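-- pv_equiv track=rewrite | github.com/branislavhesko/ACGTeam_HeartTrack | detector/phonocardiogram/learn_net.py | find_subgroup_indices
-- ===== SOURCE A (Python) =====
-- def find_subgroup_indices(binary_list):
--     start = None
--     indices = []
--
--     for i, value in enumerate(binary_list):
--         if value:
--             if start is None:
--                 start = i  # Start of a new group of 1's
--         elif start is not None:
--             indices.append((start, i - 1))  # End of the current group of 1's
--             start = None  # Reset start for the next group
--
--     if start is not None:  # If a group ends at the end of the list
--         indices.append((start, len(binary_list) - 1))
--
--     return indices
-- ===== SOURCE B (Python) =====
-- def find_subgroup_indices(binary_list):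
--     indices = []
--     n = len(binary_list)
--     i = 0
--     while i < n:
--         if binary_list[i]:
--             j = i
--             while j + 1 < n and binary_list[j + 1]:
--                 j += 1
--             indices.append((i, j))
--             i = j + 1
--         else:
--             i += 1
--     return indices
-- ===== Notes on version B (the rewrite author's own statement) =====
-- stated objective: alternative
-- what changed: Replaces the start/None state-machine single pass with a two-pointer scan that, on meeting a truthy element, advances an inner pointer to the end of the run and emits (start, end) directly, jumping past the run.
import Mathlib
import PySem

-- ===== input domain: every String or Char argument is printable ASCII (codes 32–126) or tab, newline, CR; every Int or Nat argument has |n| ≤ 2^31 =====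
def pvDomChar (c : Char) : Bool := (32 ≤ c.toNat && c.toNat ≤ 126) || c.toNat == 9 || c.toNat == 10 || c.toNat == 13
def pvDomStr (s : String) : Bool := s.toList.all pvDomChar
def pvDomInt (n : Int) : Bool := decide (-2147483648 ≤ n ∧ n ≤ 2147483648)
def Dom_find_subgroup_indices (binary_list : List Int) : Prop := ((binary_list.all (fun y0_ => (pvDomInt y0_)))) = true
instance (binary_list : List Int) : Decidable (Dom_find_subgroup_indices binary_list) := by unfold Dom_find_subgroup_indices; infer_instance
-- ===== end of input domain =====

-- B is an alternative two-pointer run scan instead of A's start/None state machine; same O(n) cost.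

-- ===== PORT A =====
-- A's loop over enumerate(binary_list) with state (start : Option Nat, indices acc);
-- at the end of the list i equals len(binary_list), so the final append uses i - 1.
def fsgA (l : List Int) (i : Nat) (start : Option Nat) (acc : List (Int × Int)) :
    List (Int × Int) :=
  match l with
  | [] =>
    match start with
    | some s => acc ++ [((s : Int), (i : Int) - 1)]
    | none => acc
  | v :: rest =>
    if v ≠ 0 then
      match start with
      | none => fsgA rest (i + 1) (some i) acc
      | some s => fsgA rest (i + 1) (some s) acc
    else
      match start with
      | some s => fsgA rest (i + 1) none (acc ++ [((s : Int), (i : Int) - 1)])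
      | none => fsgA rest (i + 1) none acc

def find_subgroup_indices (binary_list : List Int) : List (Int × Int) :=
  fsgA binary_list 0 none []

-- ===== PORT B =====
-- inner while loop: given the tail after a known-truthy element at index j,
-- advance j while the next element is truthy; returns (last index of the run, tail after the run)
def runEnd (l : List Int) (j : Nat) : Nat × List Int :=
  match l with
  | [] => (j, [])
  | v :: rest => if v ≠ 0 then runEnd rest (j + 1) else (j, v :: rest)

theorem runEnd_length_le (l : List Int) (j : Nat) : (runEnd l j).2.length ≤ l.length := by
  induction l generalizing j with
  | nil => simp [runEnd]
  | cons v rest ih =>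
    simp only [runEnd]
    split
    · exact Nat.le_trans (ih (j + 1)) (Nat.le_succ _)
    · simp

-- outer while loop: i is the index of the head of l
def fsgB (l : List Int) (i : Nat) : List (Int × Int) :=
  match h : l with
  | [] => []
  | v :: rest =>
    if v ≠ 0 then
      let p := runEnd rest i
      ((i : Int), (p.1 : Int)) :: fsgB p.2 (p.1 + 1)
    else
      fsgB rest (i + 1)
termination_by l.length
decreasing_by
  · exact Nat.lt_succ_of_le (runEnd_length_le rest i)
  · simp

def find_subgroup_indices_alt (binary_list : List Int) : List (Int × Int) :=
  fsgB binary_list 0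

-- ===== PRECONDITION & SPEC =====
def Spec_find_subgroup_indices (binary_list : List Int) (out : List (Int × Int)) : Prop := out = find_subgroup_indices_alt binary_list
instance (binary_list : List Int) (out : List (Int × Int)) : Decidable (Spec_find_subgroup_indices binary_list out) := by unfold Spec_find_subgroup_indices; infer_instance

-- ===== CLAIM (what is proved, stated in full; the proofs are below) =====
def Claim_equal_find_subgroup_indices : Prop := ∀ (binary_list : List Int), Dom_find_subgroup_indices binary_list → Spec_find_subgroup_indices binary_list (find_subgroup_indices binary_list)

-- ===== LEMMAS AND PROOFS =====

theorem fsg_key (n : Nat) :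
    ∀ l : List Int, l.length ≤ n →
      (∀ (i : Nat) (acc : List (Int × Int)), fsgA l i none acc = acc ++ fsgB l i) ∧
      (∀ (j0 s : Nat) (acc : List (Int × Int)),
        fsgA l (j0 + 1) (some s) acc =
          acc ++ ((s : Int), ((runEnd l j0).1 : Int)) ::
            fsgB (runEnd l j0).2 ((runEnd l j0).1 + 1)) := by
  induction n with
  | zero =>
    intro l hl
    have : l = [] := List.eq_nil_of_length_eq_zero (Nat.le_zero.mp hl)
    subst this
    constructor
    · intro i acc; simp [fsgA, fsgB]
    · intro j0 s acc
      simp [fsgA, runEnd, fsgB]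
  | succ n ih =>
    intro l hl
    match l with
    | [] =>
      constructor
      · intro i acc; simp [fsgA, fsgB]
      · intro j0 s acc
        simp [fsgA, runEnd, fsgB]
    | v :: rest =>
      have hr : rest.length ≤ n := by
        simpa [Nat.succ_le_succ_iff] using hl
      have IH := ih rest hr
      constructor
      · intro i acc
        by_cases hv : v = 0
        · subst hv
          simp only [fsgA, fsgB]
          simp [IH.1]
        · simp only [fsgA, fsgB, if_pos hv]
          rw [IH.2 i i acc]
      · intro j0 s acc
        by_cases hv : v = 0
        · subst hv
          have hre : runEnd (0 :: rest) j0 = (j0, 0 :: rest) := by simp [runEnd]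
          simp only [fsgA, hre]
          have h1 : ((j0 + 1 : Nat) : Int) - 1 = (j0 : Int) := by push_cast; ring
          rw [h1, IH.1 (j0 + 2) (acc ++ [((s : Int), (j0 : Int))])]
          simp [fsgB]
        · have hre : runEnd (v :: rest) j0 = runEnd rest (j0 + 1) := by
            simp [runEnd, hv]
          simp only [fsgA, if_pos hv, hre]
          exact IH.2 (j0 + 1) s acc

-- ===== VERDICT (by name: the statement is the Claim_ definition above) =====
theorem find_subgroup_indices_spec : Claim_equal_find_subgroup_indices := by
  intro l _
  unfold Spec_find_subgroup_indices find_subgroup_indices find_subgroup_indices_alt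
  simpa using (fsg_key l.length l (Nat.le_refl _)).1 0 []
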